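-- pv_equiv track=rewrite | github.com/Moremar/advent_of_code_2019 | day17/script2.py | add_commas
-- ===== SOURCE A (Python) =====
-- def add_commas(seq):
--     res = ""
--     for i in range(len(seq)-1):
--         res += seq[i]
--         if seq[i] not in "0123456789" or seq[i+1] not in "0123456789":
--             res += ","  # no comma between multi-digit numbers like "15"
--     res += seq[-1]
--     return res
-- ===== SOURCE B (Python) =====
-- def add_commas(seq):
--     groups = []
--     cur = ""
--     for ch in seq:
--         if cur and cur[-1] in "0123456789" and ch in "0123456789":
--             cur += ch
--         else:
--             if cur:
--                 groups.append(cur)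
--             cur = ch
--     groups.append(cur)
--     return ",".join(groups)
-- ===== Notes on version B (the rewrite author's own statement) =====
-- stated objective: alternative
-- what changed: B partitions the string into maximal digit-run / single-char groups in one pass and joins the groups with commas, instead of A's interleaved per-index comma insertion with a lookahead at seq[i+1].
-- crash fix: On the empty string A raises IndexError at seq[-1]; B returns "" (the join of one empty group). — e.g. on add_commas(""): A raises IndexError, B returns ""
import Mathlib
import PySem

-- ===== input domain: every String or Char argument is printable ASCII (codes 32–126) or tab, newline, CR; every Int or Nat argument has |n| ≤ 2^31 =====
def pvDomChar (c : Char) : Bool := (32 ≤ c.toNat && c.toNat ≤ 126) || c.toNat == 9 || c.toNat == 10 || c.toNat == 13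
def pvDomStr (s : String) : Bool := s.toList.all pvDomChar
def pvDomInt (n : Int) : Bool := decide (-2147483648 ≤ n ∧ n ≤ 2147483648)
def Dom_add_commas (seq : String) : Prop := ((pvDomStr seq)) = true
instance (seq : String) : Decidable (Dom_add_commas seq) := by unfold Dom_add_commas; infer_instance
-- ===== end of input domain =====

-- B groups the string into maximal digit-run / single-char fields and joins them with
-- commas, instead of A's per-index comma insertion with a lookahead; same result, no speed claim.

-- `c in "0123456789"` on a one-character string = character membership (exact here)
def pvDig (c : Char) : Bool := ("0123456789".toList).contains c

-- ===== PORT A =====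
-- loop over range(len(seq)-1); seq[i]/seq[i+1] are in range there, so getD is exact;
-- seq[-1] via pyGet? (none = IndexError, excluded by Pre_)
def add_commas (seq : String) : String :=
  let cs := seq.toList
  let res : List Char := (List.range (cs.length - 1)).foldl
    (fun r i =>
      let r := r ++ [cs.getD i ' ']
      if !(pvDig (cs.getD i ' ')) || !(pvDig (cs.getD (i+1) ' ')) then r ++ [','] else r) []
  String.mk (res ++ [(PySem.List.pyGet? cs (-1)).getD ' '])

-- ===== PORT B =====
-- exact char-level port of ",".join(groups)
def pvJoinC : List (List Char) → List Char
  | [] => []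
  | [x] => x
  | x :: y :: t => x ++ ',' :: pvJoinC (y :: t)

def pvStepB (st : List (List Char) × List Char) (ch : Char) : List (List Char) × List Char :=
  match st with
  | (gs, cur) =>
    if cur ≠ [] ∧ pvDig (cur.getLastD ' ') ∧ pvDig ch then (gs, cur ++ [ch])
    else ((if cur = [] then gs else gs ++ [cur]), [ch])

def add_commas_alt (seq : String) : String :=
  let st := seq.toList.foldl pvStepB ([], [])
  String.mk (pvJoinC (st.1 ++ [st.2]))

-- ===== PRECONDITION & SPEC =====
-- A raises IndexError at seq[-1] on the empty string; everything else is accepted.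
def Pre_add_commas (seq : String) : Prop := seq ≠ ""
instance (seq : String) : Decidable (Pre_add_commas seq) := by unfold Pre_add_commas; infer_instance
def pvWitness_add_commas : String := "a15,b"

-- On the empty string A raises IndexError at seq[-1]; B returns "" (join of one empty group);
-- checkable as Claim_raises_add_commas, proved by theorem add_commas_raises at the bottom.
def Raises_add_commas (seq : String) : Prop := seq = ""
instance (seq : String) : Decidable (Raises_add_commas seq) := by unfold Raises_add_commas; infer_instance
def pvRaiseWitness_add_commas : String := ""
def pvRaiseWitnessOut_add_commas : String := ""

def Spec_add_commas (seq : String) (out : String) : Prop := out = add_commas_alt seq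
instance (seq : String) (out : String) : Decidable (Spec_add_commas seq out) := by unfold Spec_add_commas; infer_instance

-- ===== CLAIM (what is proved, stated in full; the proofs are below) =====
def Claim_equal_add_commas : Prop := ∀ (seq : String), Dom_add_commas seq → Pre_add_commas seq → Spec_add_commas seq (add_commas seq)
def Claim_raises_add_commas : Prop := (∀ (seq : String), Dom_add_commas seq → Raises_add_commas seq → ¬ Pre_add_commas seq) ∧ (Dom_add_commas (pvRaiseWitness_add_commas) ∧ Raises_add_commas (pvRaiseWitness_add_commas) ∧ add_commas_alt (pvRaiseWitness_add_commas) = pvRaiseWitnessOut_add_commas)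

-- ===== LEMMAS AND PROOFS =====

-- common shape of both outputs: previous char c, emitted tail for the rest
def pvTail : Char → List Char → List Char
  | _, [] => []
  | c, d :: t => (if pvDig c && pvDig d then [] else [',']) ++ d :: pvTail d t

theorem pvA_loop (t : List Char) : ∀ (c : Char) (r : List Char),
    ((List.range ((c :: t).length - 1)).foldl
      (fun r i =>
        let r := r ++ [(c :: t).getD i ' ']
        if !(pvDig ((c :: t).getD i ' ')) || !(pvDig ((c :: t).getD (i+1) ' ')) then r ++ [','] else r) r)
      ++ [(c :: t).getLastD ' ']
    = r ++ c :: pvTail c t := by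
  induction t with
  | nil => intro c r; simp [pvTail]
  | cons d u ih =>
    intro c r
    have hrange : List.range ((c :: d :: u).length - 1) = 0 :: (List.range ((d :: u).length - 1)).map Nat.succ := by
      simp [List.range_succ_eq_map]
    rw [hrange]
    simp only [List.foldl_cons, List.foldl_map]
    have hstep : ∀ (a : List Char) (i : Nat),
        (let a' := a ++ [(c :: d :: u).getD (Nat.succ i) ' ']
         if !(pvDig ((c :: d :: u).getD (Nat.succ i) ' ')) || !(pvDig ((c :: d :: u).getD (Nat.succ i + 1) ' ')) then a' ++ [','] else a')
        = (let a' := a ++ [(d :: u).getD i ' ']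
           if !(pvDig ((d :: u).getD i ' ')) || !(pvDig ((d :: u).getD (i+1) ' ')) then a' ++ [','] else a') := by
      intro a i
      simp
    simp only [hstep]
    have hlast : (c :: d :: u).getLastD ' ' = (d :: u).getLastD ' ' := by
      simp
    rw [hlast]
    rw [ih d (let a := r ++ [(c :: d :: u).getD 0 ' ']
              if !(pvDig ((c :: d :: u).getD 0 ' ')) || !(pvDig ((c :: d :: u).getD 1 ' ')) then a ++ [','] else a)]
    simp only [List.getD_cons_zero, List.getD_cons_succ]
    cases hc : pvDig c <;> cases hd : pvDig d <;> simp [pvTail, hc, hd]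

theorem pvJoinC_cons_of_ne_nil (x : List Char) (l : List (List Char)) (h : l ≠ []) :
    pvJoinC (x :: l) = x ++ ',' :: pvJoinC l := by
  cases l with
  | nil => exact absurd rfl h
  | cons y t => rfl

theorem pvJoinC_snoc_grow (gs : List (List Char)) (cur : List Char) (d : Char) :
    pvJoinC (gs ++ [cur ++ [d]]) = pvJoinC (gs ++ [cur]) ++ [d] := by
  induction gs with
  | nil => rfl
  | cons x gs ih =>
    rw [List.cons_append, List.cons_append,
      pvJoinC_cons_of_ne_nil x _ (by simp), pvJoinC_cons_of_ne_nil x _ (by simp), ih]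
    simp

theorem pvJoinC_snoc_new (L : List (List Char)) (y : List Char) (h : L ≠ []) :
    pvJoinC (L ++ [y]) = pvJoinC L ++ ',' :: y := by
  induction L with
  | nil => exact absurd rfl h
  | cons x L ih =>
    cases L with
    | nil => rfl
    | cons z t =>
      rw [List.cons_append, pvJoinC_cons_of_ne_nil x _ (by simp),
        pvJoinC_cons_of_ne_nil x _ (by simp), ih (by simp)]
      simp

theorem pvB_loop (t : List Char) : ∀ (gs : List (List Char)) (cur : List Char) (c : Char),
    cur ≠ [] → cur.getLastD ' ' = c →
    pvJoinC ((t.foldl pvStepB (gs, cur)).1 ++ [(t.foldl pvStepB (gs, cur)).2])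
    = pvJoinC (gs ++ [cur]) ++ pvTail c t := by
  induction t with
  | nil => intro gs cur c _ _; simp [pvTail]
  | cons d u ih =>
    intro gs cur c hne hlast
    simp only [List.foldl_cons]
    by_cases hdig : pvDig c && pvDig d
    · have hstep : pvStepB (gs, cur) d = (gs, cur ++ [d]) := by
        simp only [pvStepB, hlast]
        rw [if_pos ⟨hne, (Bool.and_eq_true _ _).mp hdig |>.1, (Bool.and_eq_true _ _).mp hdig |>.2⟩]
      rw [hstep, ih gs (cur ++ [d]) d (by simp) (by simp)]
      rw [pvJoinC_snoc_grow]
      simp [pvTail, hdig]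
    · have hstep : pvStepB (gs, cur) d = (gs ++ [cur], [d]) := by
        simp only [pvStepB, hlast]
        rw [if_neg, if_neg hne]
        intro ⟨_, h1, h2⟩
        exact hdig (by simp [h1, h2])
      rw [hstep, ih (gs ++ [cur]) [d] d (by simp) (by simp)]
      rw [show gs ++ [cur] ++ [[d]] = (gs ++ [cur]) ++ [[d]] by simp,
        pvJoinC_snoc_new (gs ++ [cur]) [d] (by simp)]
      simp [pvTail, hdig]

-- ===== VERDICT (by name: the statement is the Claim_ definition above) =====
theorem add_commas_spec : Claim_equal_add_commas := by
  intro seq _ hpre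
  unfold Spec_add_commas add_commas add_commas_alt
  have hne : seq.toList ≠ [] := by
    intro h
    exact hpre (by have h2 := congrArg String.ofList h; simpa using h2)
  cases hcs : seq.toList with
  | nil => exact absurd hcs hne
  | cons c t =>
    have hA := pvA_loop t c []
    have hlast : (PySem.List.pyGet? (c :: t) (-1)).getD ' ' = (c :: t).getLastD ' ' := by
      rw [PySem.List.pyGet?_neg_one]
      cases h : (c :: t).getLast? with
      | none => simp at h
      | some x => simp [List.getLastD_eq_getLast?, h]
    dsimp only
    rw [hlast]
    have hB0 : pvStepB ([], []) c = ([], [c]) := by simp [pvStepB]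
    simp only [List.foldl_cons, hB0]
    rw [hA, pvB_loop t [] [c] c (by simp) (by simp)]
    simp [pvJoinC]

@[simp] theorem add_commas_raises : Claim_raises_add_commas := by
  unfold Claim_raises_add_commas
  exact ⟨fun seq _ hr hp => hp hr, by decide⟩
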